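-- pv_equiv track=rewrite | github.com/ChuyueSun/VeriStruct | src/modules/houdini.py | _find_function_start
-- ===== SOURCE A (Python) =====
-- def _find_function_start(code_lines, func_lines):
--     """Find starting line number of function in code."""
--     for i, line in enumerate(code_lines):
--         if line.strip() == func_lines[0].strip():
--             # Verify full function match
--             if all(
--                 i + j < len(code_lines) and code_lines[i + j].strip() == func_lines[j].strip()
--                 for j in range(len(func_lines))
--             ):
--                 return i + 1  # Convert to 1-based index
--     return None
-- ===== SOURCE B (Python) =====
-- def _find_function_start(code_lines, func_lines):
--     """Find starting line number of function in code."""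
--     stripped = [l.strip() for l in code_lines]
--     target = [l.strip() for l in func_lines]
--     # inverted index: stripped line -> ascending list of positions
--     index = {}
--     for i, s in enumerate(stripped):
--         index.setdefault(s, []).append(i)
--     n, m = len(stripped), len(target)
--     # candidate starts = occurrences of the first target line, then prune
--     # column by column with the occurrence sets of the remaining lines
--     cands = [i for i in index.get(target[0], []) if i + m <= n]
--     for j in range(1, m):
--         occ = set(index.get(target[j], []))
--         cands = [i for i in cands if i + j in occ]
--         if not cands:
--             return None
--     return cands[0] + 1 if cands else None
-- ===== Notes on version B (the rewrite author's own statement) =====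
-- stated objective: alternative
-- what changed: B replaces A's position-by-position window verification with an inverted index built in one pass (stripped line -> positions) and a column-major candidate-pruning search: candidates are seeded from the occurrence list of the first function line and intersected, one pattern row at a time, with shifted occurrence sets, so no per-position inner scan over the function block remains.
-- outside the precondition, e.g. on _find_function_start([], []): A returns None, B raises IndexError
import Mathlib
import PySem

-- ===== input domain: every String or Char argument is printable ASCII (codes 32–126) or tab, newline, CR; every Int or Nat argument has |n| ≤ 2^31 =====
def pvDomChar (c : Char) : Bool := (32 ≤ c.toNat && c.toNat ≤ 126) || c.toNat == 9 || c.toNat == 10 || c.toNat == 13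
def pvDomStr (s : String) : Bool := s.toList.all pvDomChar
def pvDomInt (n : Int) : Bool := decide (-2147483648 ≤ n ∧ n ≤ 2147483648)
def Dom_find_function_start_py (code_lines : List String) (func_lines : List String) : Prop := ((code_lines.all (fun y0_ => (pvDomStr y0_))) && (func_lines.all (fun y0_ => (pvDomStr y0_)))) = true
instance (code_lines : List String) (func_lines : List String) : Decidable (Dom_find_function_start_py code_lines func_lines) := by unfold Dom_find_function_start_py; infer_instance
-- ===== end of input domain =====

-- B replaces A's per-position window verification by an inverted index
-- (stripped line -> positions) and column-major candidate pruning with shifted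
-- occurrence sets (objective: alternative; no speed claim).


-- ===== PORT A =====
-- loop over enumerate(code_lines); first-line check, then the bounds-checked
-- `all` over range(len(func_lines)); the guarded indexations are in range when
-- read, so they are ported with pyGetD under the same guard.
def pvAGo (code_lines : List String) (func_lines : List String) : List (Int × String) → Option Int
  | [] => none
  | (i, line) :: rest =>
    match PySem.List.pyGet? func_lines 0 with   -- func_lines[0]: IndexError (none) iff func_lines = []
    | none => none
    | some f0 =>
      if PySem.Str.strip line == PySem.Str.strip f0 then
        if (PySem.List.pyRange 0 (func_lines.length : Int) 1).all
            (fun j => decide (i + j < (code_lines.length : Int)) &&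
              (PySem.Str.strip (PySem.List.pyGetD code_lines (i + j) "") ==
               PySem.Str.strip (PySem.List.pyGetD func_lines j ""))) then
          some (i + 1)
        else pvAGo code_lines func_lines rest
      else pvAGo code_lines func_lines rest

def find_function_start_py (code_lines : List String) (func_lines : List String) : Option Int :=
  pvAGo code_lines func_lines (PySem.List.enumerate code_lines 0)

-- ===== PORT B =====
-- one pass builds the inverted index: stripped line -> its positions, in order
def pvIndex (stripped : List String) : PySem.Dict String (List Int) :=
  (PySem.List.enumerate stripped 0).foldl (fun d p => d.modify p.2 [] (· ++ [p.1])) PySem.Dict.empty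

-- `for j in range(1, m): occ = set(...); cands = [i for i in cands if i+j in occ]; if not cands: return None`
-- then `return cands[0] + 1 if cands else None`
def pvBLoop (target : List String) (index : PySem.Dict String (List Int)) :
    List Int → List Int → Option Int
  | [], cands => match cands with | [] => none | c :: _ => some (c + 1)
  | j :: rest, cands =>
    let occ : PySem.Set Int := PySem.Set.ofList (index.getD (PySem.List.pyGetD target j "") [])
    let cands' := cands.filter (fun i => occ.contains (i + j))
    if cands' = [] then none else pvBLoop target index rest cands'

def find_function_start_py_alt (code_lines : List String) (func_lines : List String) : Option Int :=
  let stripped := code_lines.map PySem.Str.strip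
  let target := func_lines.map PySem.Str.strip
  let index := pvIndex stripped
  let n : Int := stripped.length
  let m : Int := target.length
  match PySem.List.pyGet? target 0 with   -- target[0]: IndexError (none) iff func_lines = []
  | none => none
  | some t0 =>
    pvBLoop target index (PySem.List.pyRange 1 m 1)
      ((index.getD t0 []).filter (fun i => decide (i + m ≤ n)))

-- ===== PRECONDITION & SPEC =====
-- Pre_ excludes exactly an empty func_lines: there both programs index element 0
-- of the function block — A raises IndexError whenever code_lines is non-empty
-- and B always — and on ([], []) A's None is the accidental value of a
-- never-entered loop while B still raises.
def Pre_find_function_start_py (code_lines : List String) (func_lines : List String) : Prop :=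
  func_lines ≠ []
instance (code_lines : List String) (func_lines : List String) : Decidable (Pre_find_function_start_py code_lines func_lines) := by unfold Pre_find_function_start_py; infer_instance

def pvWitness_find_function_start_py : List String × List String :=
  (["def f():", "  return 1"], ["def f():"])

def Spec_find_function_start_py (code_lines : List String) (func_lines : List String) (out : Option Int) : Prop := out = find_function_start_py_alt code_lines func_lines
instance (code_lines : List String) (func_lines : List String) (out : Option Int) : Decidable (Spec_find_function_start_py code_lines func_lines out) := by unfold Spec_find_function_start_py; infer_instance

-- ===== CLAIM (what is proved, stated in full; the proofs are below) =====
def Claim_equal_find_function_start_py : Prop := ∀ (code_lines : List String) (func_lines : List String), Dom_find_function_start_py code_lines func_lines → Pre_find_function_start_py code_lines func_lines → Spec_find_function_start_py code_lines func_lines (find_function_start_py code_lines func_lines)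

-- ===== LEMMAS AND PROOFS =====

-- the stripped window of length m at position k equals the stripped block
def pvMatch (code_lines : List String) (func_lines : List String) (k : Nat) : Bool :=
  ((code_lines.map PySem.Str.strip).drop k).take func_lines.length == func_lines.map PySem.Str.strip

-- first index satisfying p in the list, 1-based
def pvFirst (p : Nat → Bool) : List Nat → Option Int
  | [] => none
  | k :: rest => if p k then some ((k : Int) + 1) else pvFirst p rest

-- B-side: positions of value t in s, and the "matches on rows < j'" predicate
def pvPos (s : List String) (t : String) : List Nat :=
  (List.range s.length).filter (fun k => s.getD k "" == t)

def pvOk (s t : List String) (j' : Nat) (k : Nat) : Bool :=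
  decide (k + t.length ≤ s.length) &&
    (List.range j').all (fun j => s.getD (k + j) "" == t.getD j "")

theorem pvFirst_eq_head_filter (p : Nat → Bool) (l : List Nat) :
    pvFirst p l = ((l.filter p).head?).map (fun k : Nat => (k : Int) + 1) := by
  induction l with
  | nil => rfl
  | cons k rest ih => by_cases h : p k <;> simp [pvFirst, h, ih]

theorem pvMatch_head (code_lines : List String) (f0 : String) (ftl : List String) (k : Nat)
    (hmatch : pvMatch code_lines (f0 :: ftl) k = true) :
    ∃ h : k < code_lines.length,
      PySem.Str.strip (code_lines[k]'h) = PySem.Str.strip f0 := by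
  rw [pvMatch, beq_iff_eq] at hmatch
  have h0 := congrArg (fun l => l[0]?) hmatch
  simp only [List.getElem?_take, List.getElem?_drop, List.getElem?_map, List.length_cons] at h0
  rw [if_pos (by omega)] at h0
  simp only [Nat.add_zero, List.getElem?_cons_zero] at h0
  have hk : k < code_lines.length := by
    by_contra hc
    rw [List.getElem?_eq_none (by omega)] at h0
    simp at h0
  rw [List.getElem?_eq_getElem hk] at h0
  simp only [Option.map_some, Option.some_inj] at h0
  exact ⟨hk, h0⟩

theorem pvGetD_nat (xs : List String) (i : Nat) (h : i < xs.length) :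
    PySem.List.pyGetD xs (i : Int) "" = xs[i] := by
  rw [PySem.List.pyGetD_eq_getElem xs "" (by positivity) (by exact_mod_cast h)]
  congr 1

theorem pvGetD_nat_add (xs : List String) (k j : Nat) (h : k + j < xs.length) :
    PySem.List.pyGetD xs ((k : Int) + (j : Int)) "" = xs[k + j] := by
  have : (k : Int) + (j : Int) = ((k + j : Nat) : Int) := by push_cast; ring
  rw [this, pvGetD_nat xs (k + j) h]

theorem pvACond_eq (code_lines func_lines : List String) (k : Nat) :
    ((PySem.List.pyRange 0 (func_lines.length : Int) 1).all
      (fun j => decide ((k : Int) + j < (code_lines.length : Int)) &&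
        (PySem.Str.strip (PySem.List.pyGetD code_lines ((k : Int) + j) "") ==
         PySem.Str.strip (PySem.List.pyGetD func_lines j "")))) =
    pvMatch code_lines func_lines k := by
  rw [Bool.eq_iff_iff]
  rw [PySem.List.pyRange_zero_nat]
  simp only [List.all_map, List.all_eq_true, List.mem_range, Function.comp,
    Bool.and_eq_true, decide_eq_true_eq, beq_iff_eq, pvMatch]
  constructor
  · intro h
    apply List.ext_getElem?
    intro j
    rcases Nat.lt_or_ge j func_lines.length with hj | hj
    · obtain ⟨h1, h2⟩ := h j hj
      have hkj : k + j < code_lines.length := by omega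
      rw [List.getElem?_take, if_pos hj, List.getElem?_drop]
      rw [List.getElem?_map, List.getElem?_map]
      rw [List.getElem?_eq_getElem hkj, List.getElem?_eq_getElem hj]
      simp only [Option.map_some]
      apply Option.some_inj.mpr
      rw [← pvGetD_nat_add code_lines k j hkj, ← pvGetD_nat func_lines j hj, h2]
    · rw [List.getElem?_take, if_neg (by omega)]
      rw [List.getElem?_map, List.getElem?_eq_none (by simpa using hj)]
      rfl
  · intro h j hj
    have inst := congrArg (fun l => l[j]?) h
    simp only [List.getElem?_take, if_pos hj, List.getElem?_drop, List.getElem?_map] at inst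
    rw [List.getElem?_eq_getElem hj] at inst
    simp only [Option.map_some] at inst
    have hkj : k + j < code_lines.length := by
      by_contra hcon
      rw [List.getElem?_eq_none (by omega)] at inst
      simp at inst
    rw [List.getElem?_eq_getElem hkj] at inst
    simp only [Option.map_some, Option.some_inj] at inst
    refine ⟨by omega, ?_⟩
    rw [pvGetD_nat_add code_lines k j hkj, pvGetD_nat func_lines j hj, inst]

theorem pvAGo_eq (code_lines : List String) (f0 : String) (ftl : List String) :
    ∀ (suf : List String) (k : Nat), suf = code_lines.drop k →
      pvAGo code_lines (f0 :: ftl) (PySem.List.enumerate suf (k : Int)) =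
        pvFirst (pvMatch code_lines (f0 :: ftl)) (List.range' k suf.length) := by
  intro suf
  induction suf with
  | nil => intro k _; simp [PySem.List.enumerate_nil, pvAGo, pvFirst]
  | cons line rest ih =>
    intro k hsuf
    have hk : k < code_lines.length := by
      by_contra hc
      rw [List.drop_eq_nil_of_le (by omega)] at hsuf
      exact (List.cons_ne_nil _ _) hsuf
    have hline : line = code_lines[k] := by
      have := congrArg (fun l => l[0]?) hsuf
      simp only [List.getElem?_cons_zero, List.getElem?_drop, Nat.add_zero] at this
      rw [List.getElem?_eq_getElem hk] at this
      exact Option.some_inj.mp this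
    have hrest : rest = code_lines.drop (k + 1) := by
      have := congrArg List.tail hsuf
      simpa [List.tail_drop] using this
    rw [PySem.List.enumerate_cons]
    rw [show ((k : Int) + 1) = (((k + 1 : Nat)) : Int) from by push_cast; ring]
    have hlen : (line :: rest).length = rest.length + 1 := rfl
    rw [hlen, List.range'_succ]
    simp only [pvAGo, pvFirst]
    rw [show PySem.List.pyGet? (f0 :: ftl) 0 = some f0 from by
      simp [PySem.List.pyGet?, PySem.List.pyIdx?]]
    rw [pvACond_eq code_lines (f0 :: ftl) k]
    dsimp only
    by_cases hfc : PySem.Str.strip line == PySem.Str.strip f0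
    · rw [if_pos hfc]
      by_cases hmt : pvMatch code_lines (f0 :: ftl) k
      · rw [if_pos hmt, if_pos hmt]
      · rw [if_neg (by simp [hmt]), if_neg (by simp [hmt])]
        exact ih (k + 1) hrest
    · rw [if_neg hfc]
      have hmf : pvMatch code_lines (f0 :: ftl) k = false := by
        by_contra hc
        obtain ⟨h', he⟩ := pvMatch_head code_lines f0 ftl k (by simpa using hc)
        rw [hline] at hfc
        exact hfc (by simp [he])
      rw [if_neg (by simp [hmf])]
      exact ih (k + 1) hrest

-- enumerate-filter characterisation feeding the inverted index
theorem pvEnumFilter (t : String) :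
    ∀ (s : List String) (k0 : Nat),
      ((PySem.List.enumerate s (k0 : Int)).filter (fun p => p.2 == t)).map (·.1) =
        ((List.range s.length).filter (fun k => s.getD k "" == t)).map
          (fun k => ((k0 + k : Nat) : Int)) := by
  intro s
  induction s with
  | nil => intro k0; simp [PySem.List.enumerate_nil]
  | cons x xs ih =>
    intro k0
    rw [PySem.List.enumerate_cons]
    rw [show ((k0 : Int) + 1) = (((k0 + 1 : Nat)) : Int) from by push_cast; ring]
    rw [List.length_cons, List.range_succ_eq_map]
    simp only [List.filter_cons, List.filter_map, List.getD_cons_zero]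
    have hp : ((fun k => (x :: xs).getD k "" == t) ∘ Nat.succ) =
        (fun k : Nat => xs.getD k "" == t) := by
      funext k; simp
    have hf : ((fun k : Nat => ((k0 + k : Nat) : Int)) ∘ Nat.succ) =
        (fun k : Nat => (((k0 + 1 + k : Nat)) : Int)) := by
      funext k; simp only [Function.comp]; congr 1; omega
    by_cases hx : (x == t)
    · rw [if_pos hx, if_pos hx]
      simp only [List.map_cons, List.map_map, hp, hf, ih (k0 + 1)]
      simp
    · rw [if_neg (by simpa using hx), if_neg (by simpa using hx)]
      rw [List.map_map, hp, hf, ih (k0 + 1)]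

theorem pvIndex_getD (s : List String) (t : String) :
    (pvIndex s).getD t [] = (pvPos s t).map (fun k : Nat => (k : Int)) := by
  have hsw : (PySem.List.enumerate s 0).foldl
        (fun d p => d.modify p.2 [] (· ++ [p.1])) PySem.Dict.empty =
      ((PySem.List.enumerate s 0).map Prod.swap).foldl
        (fun (d : PySem.Dict String (List Int)) q => d.modify q.1 [] (· ++ [q.2]))
        PySem.Dict.empty := by
    rw [List.foldl_map]
    rfl
  rw [pvIndex, hsw, PySem.Dict.getD_foldl_modify_append, PySem.Dict.getD_empty]
  simp only [List.nil_append, List.filter_map, List.map_map]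
  have h1 : ((fun q : String × Int => q.1 == t) ∘ Prod.swap) =
      (fun p : Int × String => p.2 == t) := rfl
  have h2 : ((fun q : String × Int => q.2) ∘ Prod.swap) =
      (fun p : Int × String => p.1) := rfl
  rw [h1, h2]
  have he := pvEnumFilter t s 0
  rw [Nat.cast_zero] at he
  rw [he]
  simp [pvPos]

theorem pvPos_mem (s : List String) (t : String) (k : Nat) :
    ((k : Int) ∈ (pvPos s t).map (fun k : Nat => (k : Int))) ↔
      (k < s.length ∧ s.getD k "" = t) := by
  simp only [List.mem_map, pvPos, List.mem_filter, List.mem_range]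
  constructor
  · rintro ⟨k', ⟨hk', ht'⟩, he⟩
    have : k' = k := by exact_mod_cast he
    subst this
    exact ⟨hk', by simpa using ht'⟩
  · rintro ⟨hk, ht⟩
    exact ⟨k, ⟨hk, by simpa using ht⟩, rfl⟩

theorem pvOk_succ (s t : List String) (j' k : Nat) :
    pvOk s t (j' + 1) k = (pvOk s t j' k && (s.getD (k + j') "" == t.getD j' "")) := by
  rw [pvOk, pvOk, List.range_succ, List.all_append]
  simp [Bool.and_assoc]

theorem pvOk_mono (s t : List String) (j1 j2 k : Nat) (h : j1 ≤ j2)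
    (h2 : pvOk s t j2 k = true) : pvOk s t j1 k = true := by
  rw [pvOk] at h2 ⊢
  simp only [Bool.and_eq_true, List.all_eq_true, List.mem_range] at h2 ⊢
  exact ⟨h2.1, fun j hj => h2.2 j (by omega)⟩

-- the pruning loop computes the first full match, given the invariant state
theorem pvBLoop_inv (s t : List String) :
    ∀ (d jl : Nat), jl + d = t.length → 1 ≤ jl →
      pvBLoop t (pvIndex s) (PySem.List.pyRange (jl : Int) (t.length : Int) 1)
        (((List.range s.length).filter (pvOk s t jl)).map (fun k : Nat => (k : Int))) =
      ((((List.range s.length).filter (pvOk s t t.length)).head?).map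
        (fun k : Nat => (k : Int) + 1)) := by
  intro d
  induction d with
  | zero =>
    intro jl he _
    have hjl : jl = t.length := by omega
    subst hjl
    rw [PySem.List.pyRange_one_eq_nil (by omega)]
    cases h : ((List.range s.length).filter (pvOk s t t.length)) with
    | nil => simp [pvBLoop]
    | cons c cs => simp [pvBLoop]
  | succ d ih =>
    intro jl he hjl1
    have hlt : jl < t.length := by omega
    rw [PySem.List.pyRange_one_cons (by exact_mod_cast hlt)]
    rw [pvBLoop]
    have hget : PySem.List.pyGetD t (jl : Int) "" = t.getD jl "" := by
      simp [PySem.List.pyGetD_natCast]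
    rw [hget, pvIndex_getD]
    have hfilt :
        (((List.range s.length).filter (pvOk s t jl)).map (fun k : Nat => (k : Int))).filter
            (fun i => (PySem.Set.ofList ((pvPos s (t.getD jl "")).map
              (fun k : Nat => (k : Int)))).contains (i + (jl : Int))) =
          ((List.range s.length).filter (pvOk s t (jl + 1))).map (fun k : Nat => (k : Int)) := by
      rw [List.filter_map, List.filter_filter]
      congr 1
      apply List.filter_congr
      intro k hk
      simp only [Function.comp]
      by_cases hok : pvOk s t jl k = true
      · have hb : k + t.length ≤ s.length := by
          have := hok
          rw [pvOk] at this
          simp only [Bool.and_eq_true, decide_eq_true_eq] at this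
          exact this.1
        have hkj : k + jl < s.length := by omega
        have hcont : (PySem.Set.ofList ((pvPos s (t.getD jl "")).map
              (fun k : Nat => (k : Int)))).contains ((k : Int) + (jl : Int)) =
            (s.getD (k + jl) "" == t.getD jl "") := by
          rw [show ((k : Int) + (jl : Int)) = (((k + jl : Nat)) : Int) from by push_cast; ring]
          rw [Bool.eq_iff_iff, PySem.Set.contains, List.contains_iff_mem,
            PySem.Set.mem_ofList, pvPos_mem, beq_iff_eq]
          constructor
          · exact fun h => h.2
          · exact fun h => ⟨hkj, h⟩
        rw [hcont, pvOk_succ, hok]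
        simp
      · have hok' : pvOk s t jl k = false := by simpa using hok
        rw [pvOk_succ, hok']
        simp
    rw [hfilt]
    by_cases hemp : ((List.range s.length).filter (pvOk s t (jl + 1))).map (fun k : Nat => (k : Int)) = []
    · rw [if_pos hemp]
      have hfull : ((List.range s.length).filter (pvOk s t t.length)) = [] := by
        rw [List.eq_nil_iff_forall_not_mem]
        intro k hkm
        rw [List.mem_filter] at hkm
        have : k ∈ (List.range s.length).filter (pvOk s t (jl + 1)) := by
          rw [List.mem_filter]
          exact ⟨hkm.1, pvOk_mono s t (jl + 1) t.length k (by omega) hkm.2⟩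
        rw [List.map_eq_nil_iff] at hemp
        rw [hemp] at this
        simp at this
      rw [hfull]
      rfl
    · rw [if_neg hemp]
      rw [show ((jl : Int) + 1) = (((jl + 1 : Nat)) : Int) from by push_cast; ring]
      exact ih (jl + 1) (by omega) (by omega)

-- the stripped-window equality as a bounds-checked row-by-row condition
theorem pvOk_full (code_lines func_lines : List String) (hne : func_lines ≠ []) (k : Nat) :
    pvOk (code_lines.map PySem.Str.strip) (func_lines.map PySem.Str.strip)
      (func_lines.map PySem.Str.strip).length k = pvMatch code_lines func_lines k := by
  rw [Bool.eq_iff_iff, pvOk, pvMatch]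
  simp only [List.length_map, Bool.and_eq_true, decide_eq_true_eq, List.all_eq_true,
    List.mem_range, beq_iff_eq]
  constructor
  · rintro ⟨hb, h⟩
    apply List.ext_getElem?
    intro j
    rcases Nat.lt_or_ge j func_lines.length with hj | hj
    · have hkj : k + j < code_lines.length := by omega
      rw [List.getElem?_take, if_pos hj, List.getElem?_drop]
      have := h j hj
      rw [List.getD_eq_getElem _ _ (by simpa using hkj),
        List.getD_eq_getElem _ _ (by simpa using hj)] at this
      rw [List.getElem?_eq_getElem (by simpa using hkj),
        List.getElem?_eq_getElem (by simpa using hj)]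
      simpa using this
    · rw [List.getElem?_take, if_neg (by omega)]
      rw [List.getElem?_eq_none (by simpa using hj)]
  · intro h
    have hm : 0 < func_lines.length := List.length_pos_of_ne_nil hne
    have hlen := congrArg List.length h
    simp only [List.length_take, List.length_drop, List.length_map] at hlen
    have hb : k + func_lines.length ≤ code_lines.length := by omega
    refine ⟨hb, fun j hj => ?_⟩
    have hkj : k + j < code_lines.length := by omega
    have inst := congrArg (fun l => l[j]?) h
    simp only [List.getElem?_take, if_pos hj, List.getElem?_drop] at inst
    rw [List.getElem?_eq_getElem (by simpa using hkj),
      List.getElem?_eq_getElem (by simpa using hj)] at inst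
    simp only [Option.some_inj] at inst
    rw [List.getD_eq_getElem _ _ (by simpa using hkj),
      List.getD_eq_getElem _ _ (by simpa using hj)]
    simpa using inst

-- seeding: the filtered occurrence list of the first target line is the jl = 1 state
theorem pvSeed (code_lines : List String) (f0 : String) (ftl : List String) :
    ((pvIndex (code_lines.map PySem.Str.strip)).getD (PySem.Str.strip f0) []).filter
        (fun i => decide (i + ((((f0 :: ftl).map PySem.Str.strip).length : Nat) : Int) ≤
          (((code_lines.map PySem.Str.strip).length : Nat) : Int))) =
      ((List.range (code_lines.map PySem.Str.strip).length).filter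
        (pvOk (code_lines.map PySem.Str.strip) ((f0 :: ftl).map PySem.Str.strip) 1)).map
        (fun k : Nat => (k : Int)) := by
  rw [pvIndex_getD, pvPos, List.filter_map, List.filter_filter]
  congr 1
  apply List.filter_congr
  intro k hk
  rw [List.mem_range] at hk
  simp only [Function.comp]
  rw [pvOk]
  have hd : (decide ((k : Int) + ((((f0 :: ftl).map PySem.Str.strip).length : Nat) : Int) ≤
      (((code_lines.map PySem.Str.strip).length : Nat) : Int))) =
      (decide (k + ((f0 :: ftl).map PySem.Str.strip).length ≤
        (code_lines.map PySem.Str.strip).length)) := by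
    rw [decide_eq_decide]
    omega
  rw [hd]
  rw [show (List.range 1) = [0] from rfl]
  simp only [List.all_cons, List.all_nil, Nat.add_zero, Bool.and_true]
  rw [show ((f0 :: ftl).map PySem.Str.strip).getD 0 "" = PySem.Str.strip f0 from rfl]

-- ===== VERDICT (by name: the statement is the Claim_ definition above) =====
theorem find_function_start_py_spec : Claim_equal_find_function_start_py := by
  intro code_lines func_lines _ hpre
  unfold Spec_find_function_start_py
  obtain ⟨f0, ftl, rfl⟩ : ∃ f0 ftl, func_lines = f0 :: ftl := by
    cases func_lines with
    | nil => exact absurd rfl hpre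
    | cons a b => exact ⟨a, b, rfl⟩
  have hne : (f0 :: ftl) ≠ ([] : List String) := List.cons_ne_nil f0 ftl
  have hA : find_function_start_py code_lines (f0 :: ftl) =
      pvFirst (pvMatch code_lines (f0 :: ftl)) (List.range' 0 code_lines.length) := by
    rw [find_function_start_py]
    rw [show (0 : Int) = ((0 : Nat) : Int) from rfl]
    exact pvAGo_eq code_lines f0 ftl code_lines 0 rfl
  have hB : find_function_start_py_alt code_lines (f0 :: ftl) =
      ((((List.range (code_lines.map PySem.Str.strip).length).filter
          (pvOk (code_lines.map PySem.Str.strip) ((f0 :: ftl).map PySem.Str.strip)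
            ((f0 :: ftl).map PySem.Str.strip).length)).head?).map
        (fun k : Nat => (k : Int) + 1)) := by
    have hinv := pvBLoop_inv (code_lines.map PySem.Str.strip)
      ((f0 :: ftl).map PySem.Str.strip) (((f0 :: ftl).map PySem.Str.strip).length - 1) 1
      (by simp only [List.map_cons, List.length_cons, List.length_map]; omega) (by omega)
    have hseed := pvSeed code_lines f0 ftl
    rw [find_function_start_py_alt]
    simp only [List.map_cons]
    rw [show PySem.List.pyGet? (PySem.Str.strip f0 :: ftl.map PySem.Str.strip) 0 =
        some (PySem.Str.strip f0) from by simp [PySem.List.pyGet?, PySem.List.pyIdx?]]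
    simp only [List.map_cons] at hseed hinv
    show pvBLoop (PySem.Str.strip f0 :: List.map PySem.Str.strip ftl)
        (pvIndex (List.map PySem.Str.strip code_lines))
        (PySem.List.pyRange 1 ((PySem.Str.strip f0 :: List.map PySem.Str.strip ftl).length : Int))
        (((pvIndex (List.map PySem.Str.strip code_lines)).getD (PySem.Str.strip f0) []).filter
          (fun i => decide (i + ((PySem.Str.strip f0 :: List.map PySem.Str.strip ftl).length : Int) ≤
            ((List.map PySem.Str.strip code_lines).length : Int)))) = _
    refine Eq.trans (congrArg _ hseed) ?_
    rw [show ((1 : Nat) : Int) = (1 : Int) from by norm_num] at hinv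
    exact hinv
  rw [hA, hB, pvFirst_eq_head_filter, ← List.range_eq_range']
  have hlen2 : (code_lines.map PySem.Str.strip).length = code_lines.length := by simp
  rw [hlen2]
  exact congrArg _ (congrArg _ (List.filter_congr
    (fun k _ => (pvOk_full code_lines (f0 :: ftl) hne k).symm)))
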